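-- pv_equiv track=rewrite | github.com/dacexyai/Dacexy-backend | desktop_agent/dacexy_agent.py | needs_permission
-- ===== SOURCE A (Python) =====
-- SENSITIVE_ACTIONS = {
--     "delete_file": "🗑️ DELETE FILE",
--     "format": "⚠️ FORMAT DISK",
--     "banking": "🏦 BANKING/FINANCE",
--     "password": "🔑 PASSWORD ACCESS",
--     "camera": "📷 CAMERA ACCESS",
--     "microphone_record": "🎙️ RECORD AUDIO",
--     "payment": "💳 PAYMENT",
--     "admin": "🔐 ADMIN PRIVILEGES",
--     "shutdown": "⚡ SHUTDOWN/RESTART",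
--     "install_software": "📦 INSTALL SOFTWARE",
--     "registry": "🔧 REGISTRY EDIT",
--     "send_email": "📧 SEND EMAIL",
--     "share_screen": "🖥️ SHARE SCREEN",
-- }
--
-- def needs_permission(task: str) -> tuple[bool, str]:
--     """Check if task needs user permission. Returns (needs_permission, reason)."""
--     task_lower = task.lower()
--     if any(w in task_lower for w in ["delete", "remove", "erase", "wipe"]) and any(w in task_lower for w in ["file", "folder", "document", "data"]):
--         return True, SENSITIVE_ACTIONS["delete_file"]
--     if any(w in task_lower for w in ["bank", "banking", "hdfc", "sbi", "icici", "paytm", "gpay", "phonepay", "upi", "transfer money", "send money"]):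
--         return True, SENSITIVE_ACTIONS["banking"]
--     if any(w in task_lower for w in ["password", "credentials", "login to", "sign in to"]) and any(w in task_lower for w in ["bank", "finance", "payment"]):
--         return True, SENSITIVE_ACTIONS["password"]
--     if any(w in task_lower for w in ["pay", "payment", "checkout", "purchase", "buy now", "card number"]):
--         return True, SENSITIVE_ACTIONS["payment"]
--     if any(w in task_lower for w in ["shutdown", "restart", "reboot", "power off", "turn off computer"]):
--         return True, SENSITIVE_ACTIONS["shutdown"]
--     if any(w in task_lower for w in ["install", "setup.exe", "installer"]) and any(w in task_lower for w in ["software", "program", "app", ".exe"]):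
--         return True, SENSITIVE_ACTIONS["install_software"]
--     if any(w in task_lower for w in ["format", "format disk", "format drive", "fdisk"]):
--         return True, SENSITIVE_ACTIONS["format"]
--     if "regedit" in task_lower or "registry" in task_lower:
--         return True, SENSITIVE_ACTIONS["registry"]
--     return False, ""
-- ===== SOURCE B (Python) =====
-- SENSITIVE_ACTIONS = {
--     "delete_file": "🗑️ DELETE FILE",
--     "format": "⚠️ FORMAT DISK",
--     "banking": "🏦 BANKING/FINANCE",
--     "password": "🔑 PASSWORD ACCESS",
--     "camera": "📷 CAMERA ACCESS",
--     "microphone_record": "🎙️ RECORD AUDIO",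
--     "payment": "💳 PAYMENT",
--     "admin": "🔐 ADMIN PRIVILEGES",
--     "shutdown": "⚡ SHUTDOWN/RESTART",
--     "install_software": "📦 INSTALL SOFTWARE",
--     "registry": "🔧 REGISTRY EDIT",
--     "send_email": "📧 SEND EMAIL",
--     "share_screen": "🖥️ SHARE SCREEN",
-- }
--
-- # Every keyword any rule mentions (deduplicated).
-- _ALL_KEYWORDS = [
--     "delete", "remove", "erase", "wipe", "file", "folder", "document", "data",
--     "bank", "banking", "hdfc", "sbi", "icici", "paytm", "gpay", "phonepay",
--     "upi", "transfer money", "send money",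
--     "password", "credentials", "login to", "sign in to", "finance",
--     "pay", "payment", "checkout", "purchase", "buy now", "card number",
--     "shutdown", "restart", "reboot", "power off", "turn off computer",
--     "install", "setup.exe", "installer", "software", "program", "app", ".exe",
--     "format", "format disk", "format drive", "fdisk",
--     "regedit", "registry",
-- ]
--
--
-- def needs_permission(task: str) -> tuple[bool, str]:
--     """Check if task needs user permission. Returns (needs_permission, reason)."""
--     t = task.lower()
--     # Stage 1: one scan over the text, indexing every keyword occurring in it.
--     hits = set()
--     for i in range(len(t) + 1):
--         suffix = t[i:]
--         for w in _ALL_KEYWORDS: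
--             if suffix.startswith(w):
--                 hits.add(w)
--     # Stage 2: decide the category from the precomputed hit set.
--     if not hits.isdisjoint({"delete", "remove", "erase", "wipe"}) and not hits.isdisjoint({"file", "folder", "document", "data"}):
--         return True, SENSITIVE_ACTIONS["delete_file"]
--     if not hits.isdisjoint({"bank", "banking", "hdfc", "sbi", "icici", "paytm", "gpay", "phonepay", "upi", "transfer money", "send money"}):
--         return True, SENSITIVE_ACTIONS["banking"]
--     if not hits.isdisjoint({"password", "credentials", "login to", "sign in to"}) and not hits.isdisjoint({"bank", "finance", "payment"}):
--         return True, SENSITIVE_ACTIONS["password"]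
--     if not hits.isdisjoint({"pay", "payment", "checkout", "purchase", "buy now", "card number"}):
--         return True, SENSITIVE_ACTIONS["payment"]
--     if not hits.isdisjoint({"shutdown", "restart", "reboot", "power off", "turn off computer"}):
--         return True, SENSITIVE_ACTIONS["shutdown"]
--     if not hits.isdisjoint({"install", "setup.exe", "installer"}) and not hits.isdisjoint({"software", "program", "app", ".exe"}):
--         return True, SENSITIVE_ACTIONS["install_software"]
--     if not hits.isdisjoint({"format", "format disk", "format drive", "fdisk"}):
--         return True, SENSITIVE_ACTIONS["format"]
--     if not hits.isdisjoint({"regedit", "registry"}):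
--         return True, SENSITIVE_ACTIONS["registry"]
--     return False, ""
-- ===== Notes on version B (the rewrite author's own statement) =====
-- stated objective: alternative
-- what changed: B makes one positional scan over the lowered task, building a set of all keywords that occur in it, and then classifies with constant set-disjointness tests per rule, instead of A's cascade of per-keyword substring searches.
import Mathlib
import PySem

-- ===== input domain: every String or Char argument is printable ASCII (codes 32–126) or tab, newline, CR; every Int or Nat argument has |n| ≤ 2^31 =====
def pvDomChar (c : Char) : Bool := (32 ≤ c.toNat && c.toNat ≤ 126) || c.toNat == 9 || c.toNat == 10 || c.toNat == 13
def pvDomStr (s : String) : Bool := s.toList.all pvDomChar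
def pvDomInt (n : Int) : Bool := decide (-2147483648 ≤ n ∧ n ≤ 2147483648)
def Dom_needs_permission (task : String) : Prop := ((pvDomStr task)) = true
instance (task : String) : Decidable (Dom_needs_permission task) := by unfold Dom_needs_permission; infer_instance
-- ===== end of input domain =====

-- B replaces A's cascade of substring searches by one positional scan building the set of
-- occurring keywords, followed by set-disjointness tests per rule (objective: alternative).

-- ===== PORT A =====
-- module constant SENSITIVE_ACTIONS (shared context of both implementations)
def sensitiveActions : PySem.Dict String String := PySem.Dict.ofList
  [("delete_file", "🗑️ DELETE FILE"), ("format", "⚠️ FORMAT DISK"),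
   ("banking", "🏦 BANKING/FINANCE"), ("password", "🔑 PASSWORD ACCESS"),
   ("camera", "📷 CAMERA ACCESS"), ("microphone_record", "🎙️ RECORD AUDIO"),
   ("payment", "💳 PAYMENT"), ("admin", "🔐 ADMIN PRIVILEGES"),
   ("shutdown", "⚡ SHUTDOWN/RESTART"), ("install_software", "📦 INSTALL SOFTWARE"),
   ("registry", "🔧 REGISTRY EDIT"), ("send_email", "📧 SEND EMAIL"),
   ("share_screen", "🖥️ SHARE SCREEN")]

-- literal transliteration of A's if-chain; SENSITIVE_ACTIONS[k] is a lookup of a present key,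
-- rendered as getD (none of these lookups can raise)
def needs_permission (task : String) : Bool × String :=
  let task_lower := PySem.Str.lower task
  if (["delete", "remove", "erase", "wipe"].any fun w => PySem.Str.isIn w task_lower) &&
     (["file", "folder", "document", "data"].any fun w => PySem.Str.isIn w task_lower) then
    (true, sensitiveActions.getD "delete_file" "")
  else if (["bank", "banking", "hdfc", "sbi", "icici", "paytm", "gpay", "phonepay", "upi",
            "transfer money", "send money"].any fun w => PySem.Str.isIn w task_lower) then
    (true, sensitiveActions.getD "banking" "")
  else if (["password", "credentials", "login to", "sign in to"].any fun w => PySem.Str.isIn w task_lower) &&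
          (["bank", "finance", "payment"].any fun w => PySem.Str.isIn w task_lower) then
    (true, sensitiveActions.getD "password" "")
  else if (["pay", "payment", "checkout", "purchase", "buy now", "card number"].any fun w => PySem.Str.isIn w task_lower) then
    (true, sensitiveActions.getD "payment" "")
  else if (["shutdown", "restart", "reboot", "power off", "turn off computer"].any fun w => PySem.Str.isIn w task_lower) then
    (true, sensitiveActions.getD "shutdown" "")
  else if (["install", "setup.exe", "installer"].any fun w => PySem.Str.isIn w task_lower) &&
          (["software", "program", "app", ".exe"].any fun w => PySem.Str.isIn w task_lower) then
    (true, sensitiveActions.getD "install_software" "")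
  else if (["format", "format disk", "format drive", "fdisk"].any fun w => PySem.Str.isIn w task_lower) then
    (true, sensitiveActions.getD "format" "")
  else if PySem.Str.isIn "regedit" task_lower || PySem.Str.isIn "registry" task_lower then
    (true, sensitiveActions.getD "registry" "")
  else
    (false, "")

-- ===== PORT B =====
-- _ALL_KEYWORDS of Source B
def pvAllKeywords : List String :=
  ["delete", "remove", "erase", "wipe", "file", "folder", "document", "data",
   "bank", "banking", "hdfc", "sbi", "icici", "paytm", "gpay", "phonepay",
   "upi", "transfer money", "send money",
   "password", "credentials", "login to", "sign in to", "finance",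
   "pay", "payment", "checkout", "purchase", "buy now", "card number",
   "shutdown", "restart", "reboot", "power off", "turn off computer",
   "install", "setup.exe", "installer", "software", "program", "app", ".exe",
   "format", "format disk", "format drive", "fdisk",
   "regedit", "registry"]

-- stage 1 of Source B: the scan over positions i of t, adding every keyword the suffix t[i:] starts with
def pvBuildHits (t : String) : PySem.Set String :=
  (PySem.List.pyRange 0 (PySem.Str.len t + 1) 1).foldl
    (fun hits i =>
      let suffix := PySem.Str.slice t (some i) none
      pvAllKeywords.foldl
        (fun h w => if PySem.Str.startswith suffix w then PySem.Set.add h w else h) hits)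
    PySem.Set.empty

def needs_permission_alt (task : String) : Bool × String :=
  let t := PySem.Str.lower task
  let hits := pvBuildHits t
  if !(PySem.Set.isdisjoint hits (PySem.Set.ofList ["delete", "remove", "erase", "wipe"])) &&
     !(PySem.Set.isdisjoint hits (PySem.Set.ofList ["file", "folder", "document", "data"])) then
    (true, sensitiveActions.getD "delete_file" "")
  else if !(PySem.Set.isdisjoint hits (PySem.Set.ofList ["bank", "banking", "hdfc", "sbi", "icici",
              "paytm", "gpay", "phonepay", "upi", "transfer money", "send money"])) then
    (true, sensitiveActions.getD "banking" "")
  else if !(PySem.Set.isdisjoint hits (PySem.Set.ofList ["password", "credentials", "login to", "sign in to"])) &&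
          !(PySem.Set.isdisjoint hits (PySem.Set.ofList ["bank", "finance", "payment"])) then
    (true, sensitiveActions.getD "password" "")
  else if !(PySem.Set.isdisjoint hits (PySem.Set.ofList ["pay", "payment", "checkout", "purchase", "buy now", "card number"])) then
    (true, sensitiveActions.getD "payment" "")
  else if !(PySem.Set.isdisjoint hits (PySem.Set.ofList ["shutdown", "restart", "reboot", "power off", "turn off computer"])) then
    (true, sensitiveActions.getD "shutdown" "")
  else if !(PySem.Set.isdisjoint hits (PySem.Set.ofList ["install", "setup.exe", "installer"])) &&
          !(PySem.Set.isdisjoint hits (PySem.Set.ofList ["software", "program", "app", ".exe"])) then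
    (true, sensitiveActions.getD "install_software" "")
  else if !(PySem.Set.isdisjoint hits (PySem.Set.ofList ["format", "format disk", "format drive", "fdisk"])) then
    (true, sensitiveActions.getD "format" "")
  else if !(PySem.Set.isdisjoint hits (PySem.Set.ofList ["regedit", "registry"])) then
    (true, sensitiveActions.getD "registry" "")
  else
    (false, "")

-- ===== PRECONDITION & SPEC =====
def Spec_needs_permission (task : String) (out : Bool × String) : Prop := out = needs_permission_alt task
instance (task : String) (out : Bool × String) : Decidable (Spec_needs_permission task out) := by unfold Spec_needs_permission; infer_instance

-- ===== CLAIM =====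
def Claim_equal_needs_permission : Prop := ∀ (task : String), Dom_needs_permission task → Spec_needs_permission task (needs_permission task)

-- ===== LEMMAS AND PROOFS =====

-- inner keyword loop: membership after the add-if fold
theorem pv_mem_foldl_add_if {p : String → Bool} (ks : List String) (h : PySem.Set String) (w : String) :
    w ∈ ks.foldl (fun h w' => if p w' then PySem.Set.add h w' else h) h ↔
      w ∈ h ∨ (w ∈ ks ∧ p w = true) := by
  induction ks generalizing h with
  | nil => simp
  | cons k ks ih =>
    simp only [List.foldl_cons, ih, List.mem_cons]
    by_cases hp : p k
    · simp only [hp, if_pos]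
      rw [PySem.Set.mem_add]
      constructor
      · rintro (⟨hw | hw⟩ | ⟨hw, hpw⟩)
        · exact Or.inl hw
        · exact Or.inr ⟨Or.inl hw, hw ▸ hp⟩
        · exact Or.inr ⟨Or.inr hw, hpw⟩
      · rintro (hw | ⟨hw | hw, hpw⟩)
        · exact Or.inl (Or.inl hw)
        · exact Or.inl (Or.inr hw)
        · exact Or.inr ⟨hw, hpw⟩
    · simp only [hp, Bool.false_eq_true]
      constructor
      · rintro (hw | ⟨hw, hpw⟩)
        · exact Or.inl hw
        · exact Or.inr ⟨Or.inr hw, hpw⟩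
      · rintro (hw | ⟨hw | hw, hpw⟩)
        · exact Or.inl hw
        · exact absurd (hw ▸ hpw) (by simpa using hp)
        · exact Or.inr ⟨hw, hpw⟩

-- outer position loop: membership after the whole scan
theorem pv_mem_scan (t : String) (P : List Int) (acc : PySem.Set String) (w : String) :
    w ∈ P.foldl (fun hits i =>
        pvAllKeywords.foldl
          (fun h w' => if PySem.Str.startswith (PySem.Str.slice t (some i) none) w' then PySem.Set.add h w' else h) hits) acc ↔
      w ∈ acc ∨ (w ∈ pvAllKeywords ∧ ∃ i ∈ P, PySem.Str.startswith (PySem.Str.slice t (some i) none) w = true) := by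
  induction P generalizing acc with
  | nil => simp
  | cons j P ih =>
    simp only [List.foldl_cons, ih, pv_mem_foldl_add_if, List.mem_cons]
    constructor
    · rintro (⟨hw | ⟨hk, hs⟩⟩ | ⟨hk, i, hi, hs⟩)
      · exact Or.inl hw
      · exact Or.inr ⟨hk, j, Or.inl rfl, hs⟩
      · exact Or.inr ⟨hk, i, Or.inr hi, hs⟩
    · rintro (hw | ⟨hk, i, hi | hi, hs⟩)
      · exact Or.inl (Or.inl hw)
      · exact Or.inl (Or.inr ⟨hk, hi ▸ hs⟩)
      · exact Or.inr ⟨hk, i, hi, hs⟩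

-- the hit set contains exactly the keywords occurring in t
theorem pv_mem_buildHits (t : String) (w : String) :
    w ∈ pvBuildHits t ↔ w ∈ pvAllKeywords ∧ PySem.Str.isIn w t = true := by
  unfold pvBuildHits
  rw [pv_mem_scan]
  simp only [PySem.Set.empty, List.not_mem_nil, false_or]
  refine and_congr_right fun _ => ?_
  have hrange : PySem.Str.len t + 1 = ((t.toList.length + 1 : Nat) : Int) := by
    simp [PySem.Str.len]
  constructor
  · rintro ⟨i, hi, hs⟩
    rw [PySem.Str.isIn_eq, ← PySem.Chars.exists_prefix_drop_iff_isIn]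
    have h0 : (0 : Int) ≤ i := ((PySem.List.mem_pyRange_iff_of_pos (by norm_num) i).mp hi).1
    refine ⟨i.toNat, ?_⟩
    have hpre := (PySem.Str.startswith_eq (PySem.Str.slice t (some i) none) w) ▸ hs
    rw [PySem.Chars.startswith_iff] at hpre
    rwa [PySem.Str.toList_slice, PySem.Chars.slice_eq_listSlice,
      PySem.List.slice_from t.toList h0] at hpre
  · intro hin
    rw [PySem.Str.isIn_eq, ← PySem.Chars.exists_prefix_drop_iff_isIn] at hin
    obtain ⟨j, hj⟩ := hin
    -- use position min j (len t), which lies inside range(len+1)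
    refine ⟨(min j t.toList.length : Nat), ?_, ?_⟩
    · rw [hrange, PySem.List.mem_pyRange_iff_of_pos (by norm_num)]
      refine ⟨by positivity, ?_, ⟨_, (one_mul _).symm⟩⟩
      have : min j t.toList.length ≤ t.toList.length := min_le_right _ _
      push_cast
      omega
    · rw [PySem.Str.startswith_eq, PySem.Chars.startswith_iff, PySem.Str.toList_slice,
        PySem.Chars.slice_eq_listSlice, PySem.List.slice_from t.toList (by positivity)]
      simp only [Int.toNat_natCast]
      rcases Nat.lt_or_ge t.toList.length j with hlt | hle
      · have h1 : t.toList.drop j = [] := List.drop_eq_nil_of_le (le_of_lt hlt)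
        have h2 : t.toList.drop (min j t.toList.length) = [] := by
          rw [min_eq_right (le_of_lt hlt)]
          exact List.drop_eq_nil_of_le le_rfl
        simp only [h2]
        rw [h1] at hj
        simpa using hj
      · rw [min_eq_left (by simpa using hle)]
        exact hj

-- a group test on the hit set equals A's any-isIn test, for any group of listed keywords
theorem pv_group_eq (t : String) (G : List String) (hG : G.all (fun w => w ∈ pvAllKeywords)) :
    (!(PySem.Set.isdisjoint (pvBuildHits t) (PySem.Set.ofList G))) =
      (G.any fun w => PySem.Str.isIn w t) := by
  rw [Bool.eq_iff_iff, Bool.not_eq_true', ← Bool.not_eq_true, PySem.Set.isdisjoint_iff,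
    List.any_eq_true]
  push Not
  constructor
  · rintro ⟨x, hx, hxg⟩
    rw [PySem.Set.mem_ofList] at hxg
    rw [pv_mem_buildHits] at hx
    exact ⟨x, hxg, hx.2⟩
  · rintro ⟨w, hwG, hw⟩
    exact ⟨w, (pv_mem_buildHits t w).mpr ⟨by simpa using (List.all_eq_true.mp hG) w hwG, hw⟩,
      (PySem.Set.mem_ofList _ _).mpr hwG⟩

-- ===== VERDICT =====
theorem needs_permission_spec : Claim_equal_needs_permission := by
  intro task _
  unfold Spec_needs_permission
  have h1 := pv_group_eq (PySem.Str.lower task) ["delete", "remove", "erase", "wipe"] (by decide)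
  have h2 := pv_group_eq (PySem.Str.lower task) ["file", "folder", "document", "data"] (by decide)
  have h3 := pv_group_eq (PySem.Str.lower task) ["bank", "banking", "hdfc", "sbi", "icici",
    "paytm", "gpay", "phonepay", "upi", "transfer money", "send money"] (by decide)
  have h4 := pv_group_eq (PySem.Str.lower task) ["password", "credentials", "login to", "sign in to"] (by decide)
  have h5 := pv_group_eq (PySem.Str.lower task) ["bank", "finance", "payment"] (by decide)
  have h6 := pv_group_eq (PySem.Str.lower task) ["pay", "payment", "checkout", "purchase", "buy now", "card number"] (by decide)
  have h7 := pv_group_eq (PySem.Str.lower task) ["shutdown", "restart", "reboot", "power off", "turn off computer"] (by decide)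
  have h8 := pv_group_eq (PySem.Str.lower task) ["install", "setup.exe", "installer"] (by decide)
  have h9 := pv_group_eq (PySem.Str.lower task) ["software", "program", "app", ".exe"] (by decide)
  have h10 := pv_group_eq (PySem.Str.lower task) ["format", "format disk", "format drive", "fdisk"] (by decide)
  have h11 := pv_group_eq (PySem.Str.lower task) ["regedit", "registry"] (by decide)
  simp only [needs_permission, needs_permission_alt, h1, h2, h3, h4, h5, h6, h7, h8, h9, h10, h11,
    List.any_cons, List.any_nil, Bool.or_false]
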